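-- pv_equiv track=rewrite | github.com/visionsss/recommend_system_version2 | Test/views.py | get_personality_type
-- ===== SOURCE A (Python) =====
-- def get_personality_type(n):
--     re = {'A': 0, 'C': 0, 'E': 0, 'I': 0, 'R': 0, 'S': 0}
--     for i in range(1, len(n)):
--         if n[i] == '1':
--             if i in [2, 4, 14, 17, 21, 32, 39, 43]:
--                 re['A'] += 1
--             if i in [1, 3, 7, 13, 29, 33, 38, 44]:
--                 re['C'] += 1
--             if i in [5, 9, 11, 25, 28, 35, 37, 45]:
--                 re['E'] += 1
--             if i in [6, 16, 18, 20, 30, 31, 40, 47]: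
--                 re['I'] += 1
--             if i in [10, 12, 22, 26, 34, 36, 41, 48]:
--                 re['R'] += 1
--             if i in [8, 15, 19, 23, 24, 27, 42, 46]:
--                 re['S'] += 1
--     re = sorted(re.items(), key=lambda d: d[1], reverse=True)
--     return re[0][0]+re[1][0]+re[2][0]
-- ===== SOURCE B (Python) =====
-- def get_personality_type(n):
--     cats = {'A': [2, 4, 14, 17, 21, 32, 39, 43],
--             'C': [1, 3, 7, 13, 29, 33, 38, 44],
--             'E': [5, 9, 11, 25, 28, 35, 37, 45],
--             'I': [6, 16, 18, 20, 30, 31, 40, 47],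
--             'R': [10, 12, 22, 26, 34, 36, 41, 48],
--             'S': [8, 15, 19, 23, 24, 27, 42, 46]}
--     re = {k: sum(1 for idx in v if idx < len(n) and n[idx] == '1')
--           for k, v in cats.items()}
--     top = sorted(re.items(), key=lambda d: d[1], reverse=True)
--     return top[0][0] + top[1][0] + top[2][0]
-- ===== Notes on version B (the rewrite author's own statement) =====
-- stated objective: idiomatic
-- what changed: Replaces the per-index loop with six membership tests and a mutated counter dict by a transposed traversal: a letter-to-indices table and a dict comprehension that counts each letter's hit indices directly.
import Mathlib
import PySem

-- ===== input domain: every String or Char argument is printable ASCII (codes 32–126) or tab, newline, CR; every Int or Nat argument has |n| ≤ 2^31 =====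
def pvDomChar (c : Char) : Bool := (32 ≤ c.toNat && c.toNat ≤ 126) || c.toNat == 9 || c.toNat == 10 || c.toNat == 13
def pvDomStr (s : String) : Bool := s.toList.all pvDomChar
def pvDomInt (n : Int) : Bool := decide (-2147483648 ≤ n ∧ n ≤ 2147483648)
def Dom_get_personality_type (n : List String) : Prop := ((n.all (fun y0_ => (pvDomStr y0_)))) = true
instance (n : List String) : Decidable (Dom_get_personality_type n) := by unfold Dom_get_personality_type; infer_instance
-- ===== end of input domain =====

-- B transposes A's traversal: instead of scanning every index of n and testing it against six
-- 8-element lists, it keeps a letter→indices table and counts each letter's hit indices directly.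

-- ===== PORT A =====
-- re[k] += 1 (the key is always present in A's dict)
def pvBump (d : PySem.Dict String Int) (k : String) : PySem.Dict String Int :=
  d.insert k (d.getD k 0 + 1)

-- loop body of A's 'for i in range(1, len(n))'
def pvBodyA (n : List String) (d : PySem.Dict String Int) (i : Int) : PySem.Dict String Int :=
  if PySem.List.pyGetD n i "" == "1" then  -- n[i]; i is drawn from range(1, len(n)), always in range
    let d := if i ∈ ([2, 4, 14, 17, 21, 32, 39, 43] : List Int) then pvBump d "A" else d
    let d := if i ∈ ([1, 3, 7, 13, 29, 33, 38, 44] : List Int) then pvBump d "C" else d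
    let d := if i ∈ ([5, 9, 11, 25, 28, 35, 37, 45] : List Int) then pvBump d "E" else d
    let d := if i ∈ ([6, 16, 18, 20, 30, 31, 40, 47] : List Int) then pvBump d "I" else d
    let d := if i ∈ ([10, 12, 22, 26, 34, 36, 41, 48] : List Int) then pvBump d "R" else d
    let d := if i ∈ ([8, 15, 19, 23, 24, 27, 42, 46] : List Int) then pvBump d "S" else d
    d
  else d

def get_personality_type (n : List String) : String :=
  let re0 : PySem.Dict String Int := ⟨[("A", 0), ("C", 0), ("E", 0), ("I", 0), ("R", 0), ("S", 0)]⟩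
  let re := (PySem.List.pyRange 1 (n.length : Int) 1).foldl (pvBodyA n) re0
  let s := PySem.List.sorted re.items (fun d => d.2) true
  -- re[0][0]+re[1][0]+re[2][0]: the dict always has six entries, so indexing never raises
  ((PySem.List.pyGet? s 0).map Prod.fst).getD "" ++ ((PySem.List.pyGet? s 1).map Prod.fst).getD ""
    ++ ((PySem.List.pyGet? s 2).map Prod.fst).getD ""

-- ===== PORT B =====
-- sum(1 for idx in idxs if idx < len(n) and n[idx] == '1')
def pvScore (n : List String) (idxs : List Int) : Int :=
  (idxs.countP (fun idx => decide (idx < (n.length : Int)) && (PySem.List.pyGetD n idx "" == "1")) : Nat)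

def pvCats : List (String × List Int) :=
  [("A", [2, 4, 14, 17, 21, 32, 39, 43]),
   ("C", [1, 3, 7, 13, 29, 33, 38, 44]),
   ("E", [5, 9, 11, 25, 28, 35, 37, 45]),
   ("I", [6, 16, 18, 20, 30, 31, 40, 47]),
   ("R", [10, 12, 22, 26, 34, 36, 41, 48]),
   ("S", [8, 15, 19, 23, 24, 27, 42, 46])]

def get_personality_type_alt (n : List String) : String :=
  -- the dict comprehension over cats: its items are exactly this map, in cats' key order
  let re : List (String × Int) := pvCats.map (fun kv => (kv.1, pvScore n kv.2))
  let s := PySem.List.sorted re (fun d => d.2) true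
  ((PySem.List.pyGet? s 0).map Prod.fst).getD "" ++ ((PySem.List.pyGet? s 1).map Prod.fst).getD ""
    ++ ((PySem.List.pyGet? s 2).map Prod.fst).getD ""

-- ===== PRECONDITION & SPEC =====
def Spec_get_personality_type (n : List String) (out : String) : Prop := out = get_personality_type_alt n
instance (n : List String) (out : String) : Decidable (Spec_get_personality_type n out) := by unfold Spec_get_personality_type; infer_instance

-- ===== CLAIM (what is proved, stated in full; the proofs are below) =====
def Claim_equal_get_personality_type : Prop := ∀ (n : List String), Dom_get_personality_type n → Spec_get_personality_type n (get_personality_type n)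

-- ===== LEMMAS AND PROOFS =====

-- per-letter count of A's loop restricted to an index list L
def pvCnt (n : List String) (lX : List Int) (L : List Int) : Int :=
  (L.countP (fun j => (PySem.List.pyGetD n j "" == "1") && decide (j ∈ lX)) : Nat)

-- A's dict bump on the six-entry literal dict, one lemma per key
theorem pvBumpA (a c e i r s : Int) : pvBump ⟨[("A", a), ("C", c), ("E", e), ("I", i), ("R", r), ("S", s)]⟩ "A" = ⟨[("A", a+1), ("C", c), ("E", e), ("I", i), ("R", r), ("S", s)]⟩ := rfl
theorem pvBumpC (a c e i r s : Int) : pvBump ⟨[("A", a), ("C", c), ("E", e), ("I", i), ("R", r), ("S", s)]⟩ "C" = ⟨[("A", a), ("C", c+1), ("E", e), ("I", i), ("R", r), ("S", s)]⟩ := rfl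
theorem pvBumpE (a c e i r s : Int) : pvBump ⟨[("A", a), ("C", c), ("E", e), ("I", i), ("R", r), ("S", s)]⟩ "E" = ⟨[("A", a), ("C", c), ("E", e+1), ("I", i), ("R", r), ("S", s)]⟩ := rfl
theorem pvBumpI (a c e i r s : Int) : pvBump ⟨[("A", a), ("C", c), ("E", e), ("I", i), ("R", r), ("S", s)]⟩ "I" = ⟨[("A", a), ("C", c), ("E", e), ("I", i+1), ("R", r), ("S", s)]⟩ := rfl
theorem pvBumpR (a c e i r s : Int) : pvBump ⟨[("A", a), ("C", c), ("E", e), ("I", i), ("R", r), ("S", s)]⟩ "R" = ⟨[("A", a), ("C", c), ("E", e), ("I", i), ("R", r+1), ("S", s)]⟩ := rfl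
theorem pvBumpS (a c e i r s : Int) : pvBump ⟨[("A", a), ("C", c), ("E", e), ("I", i), ("R", r), ("S", s)]⟩ "S" = ⟨[("A", a), ("C", c), ("E", e), ("I", i), ("R", r), ("S", s+1)]⟩ := rfl

-- loop invariant: A's fold over any index list L adds, to each letter's counter,
-- the number of indices in L that hold '1' and belong to that letter's list
set_option maxHeartbeats 1000000 in
theorem pv_foldl_items (n : List String) (L : List Int) (a c e i r s : Int) :
    ((L.foldl (pvBodyA n) ⟨[("A", a), ("C", c), ("E", e), ("I", i), ("R", r), ("S", s)]⟩).items)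
      = [("A", a + pvCnt n [2,4,14,17,21,32,39,43] L),
         ("C", c + pvCnt n [1,3,7,13,29,33,38,44] L),
         ("E", e + pvCnt n [5,9,11,25,28,35,37,45] L),
         ("I", i + pvCnt n [6,16,18,20,30,31,40,47] L),
         ("R", r + pvCnt n [10,12,22,26,34,36,41,48] L),
         ("S", s + pvCnt n [8,15,19,23,24,27,42,46] L)] := by
  induction L generalizing a c e i r s with
  | nil => simp [pvCnt]
  | cons j L ih =>
    have hstep : ∀ lX, pvCnt n lX (j :: L)
        = pvCnt n lX L + (if (PySem.List.pyGetD n j "" == "1") = true ∧ j ∈ lX then 1 else 0) := by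
      intro lX
      simp only [pvCnt, List.countP_cons, Bool.and_eq_true, decide_eq_true_eq]
      split_ifs with h <;> push_cast <;> ring
    simp only [List.foldl_cons, hstep]
    by_cases hg : (PySem.List.pyGetD n j "" == "1") = true
    · simp only [pvBodyA, hg, if_true, true_and]
      split_ifs with h1 h2 h3 h4 h5 h6
      all_goals
        simp only [pvBumpA, pvBumpC, pvBumpE, pvBumpI, pvBumpR, pvBumpS, ih, List.cons.injEq,
          Prod.mk.injEq, and_true]
      all_goals and_intros <;> first | trivial | ring
    · have hg' : (PySem.List.pyGetD n j "" == "1") = false := by simpa using hg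
      simp only [pvBodyA, hg', Bool.false_eq_true, if_false, ih, false_and,
        List.cons.injEq, Prod.mk.injEq]
      norm_num

-- counting over the scanned range of indices that lie in lX = counting over lX
-- of the indices that lie in the range (transposition of the two traversals)
theorem pv_countP_comm (l1 l2 : List Int) (q : Int → Bool) (h1 : l1.Nodup) (h2 : l2.Nodup) :
    l1.countP (fun x => q x && decide (x ∈ l2)) = l2.countP (fun x => q x && decide (x ∈ l1)) := by
  classical
  rw [List.countP_eq_length_filter, List.countP_eq_length_filter,
    ← List.toFinset_card_of_nodup (h1.filter _), ← List.toFinset_card_of_nodup (h2.filter _)]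
  congr 1
  ext x
  simp
  tauto

theorem pv_cnt_eq_score (n : List String) (lX : List Int) (hnd : lX.Nodup)
    (hpos : ∀ x ∈ lX, 1 ≤ x) :
    pvCnt n lX (PySem.List.pyRange 1 (n.length : Int) 1) = pvScore n lX := by
  unfold pvCnt pvScore
  congr 1
  rw [pv_countP_comm _ _ _ (PySem.List.nodup_pyRange_one 1 (n.length : Int)) hnd]
  apply List.countP_congr
  intro x hx
  have h1 := hpos x hx
  simp [PySem.List.mem_pyRange_one, h1, Bool.and_comm]

-- ===== VERDICT (by name: the statement is the Claim_ definition above) =====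
theorem get_personality_type_spec : Claim_equal_get_personality_type := by
  intro n _
  unfold Spec_get_personality_type get_personality_type get_personality_type_alt
  dsimp only
  have h := pv_foldl_items n (PySem.List.pyRange 1 (n.length : Int) 1) 0 0 0 0 0 0
  simp only [zero_add] at h
  rw [h, pv_cnt_eq_score n _ (by decide) (by decide),
    pv_cnt_eq_score n _ (by decide) (by decide), pv_cnt_eq_score n _ (by decide) (by decide),
    pv_cnt_eq_score n _ (by decide) (by decide), pv_cnt_eq_score n _ (by decide) (by decide),
    pv_cnt_eq_score n _ (by decide) (by decide)]
  rfl
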